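-- pv_equiv track=rewrite | github.com/glennfeys/Discrete-algorithms | project_4/niels_laurens/permute-lexicographic.py | permLexUnrank
-- ===== SOURCE A (Python) =====
-- import math
--
-- def permLexUnrank(n, r):
--     T = [1]
--     for j in range(1, n):
--         mod = (r % math.factorial(j + 1))
--         d = mod // math.factorial(j)
--         r -= mod
--         T.append(d + 1)
--         for i in range(0, j):
--             if T[i] > d:
--                 T[i] += 1
--     T.reverse()
--     return T
-- ===== SOURCE B (Python) =====
-- def permLexUnrank(n, r):
--     # Peel off the factorial digits of r (Lehmer code) by successive divmod,
--     # then build the permutation by picking the d-th remaining value.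
--     codes = []
--     q = r
--     for j in range(2, n + 1):
--         q, d = divmod(q, j)
--         codes.append(d)
--     avail = list(range(1, n + 1))
--     out = [avail.pop(d) for d in reversed(codes)]
--     out.append(avail[0])
--     return out
-- ===== Notes on version B (the rewrite author's own statement) =====
-- stated objective: faster
-- what changed: A recomputes math.factorial from scratch every iteration and re-labels all previously placed entries after each step (quadratic bump loop); B peels the factorial digits of r with successive divmod on a shrinking quotient and builds the permutation by popping the d-th remaining value from a list of candidates.
-- outside the precondition, e.g. on permLexUnrank(0, 5): A returns [1], B raises IndexError; on permLexUnrank(-2, 7): A returns [1], B raises IndexError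
import Mathlib
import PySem

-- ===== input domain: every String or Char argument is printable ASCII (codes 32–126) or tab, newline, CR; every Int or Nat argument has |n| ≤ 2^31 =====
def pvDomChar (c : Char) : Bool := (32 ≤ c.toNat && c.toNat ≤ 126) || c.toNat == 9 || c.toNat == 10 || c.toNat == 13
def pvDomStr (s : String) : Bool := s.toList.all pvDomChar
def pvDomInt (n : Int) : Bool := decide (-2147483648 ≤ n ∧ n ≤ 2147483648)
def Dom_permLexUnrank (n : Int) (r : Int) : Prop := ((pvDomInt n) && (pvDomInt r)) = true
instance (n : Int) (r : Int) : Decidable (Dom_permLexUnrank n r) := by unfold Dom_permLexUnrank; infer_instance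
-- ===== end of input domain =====

-- B replaces A's quadratic bump-relabelling (and per-step factorial recomputation) by
-- factorial digits peeled off with successive divmod plus selection from the remaining values.


-- ===== PORT A =====
-- math.factorial(k); A only calls it with k ≥ 2, where it is this product loop
def mathFactorial (k : Int) : Int := (List.range k.toNat).foldl (fun (a : Int) (i : Nat) => a * ((i : Int) + 1)) 1

def permLexUnrank (n : Int) (r : Int) : List Int :=
  let st := (PySem.List.pyRange 1 n 1).foldl (fun (st : Int × List Int) j =>
    let md := PySem.Int.mod st.1 (mathFactorial (j + 1))
    let d := PySem.Int.floordiv md (mathFactorial j)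
    let r' := st.1 - md
    let T1 := st.2 ++ [d + 1]
    let T2 := (PySem.List.pyRange 0 j 1).foldl (fun T i =>
        if PySem.List.pyGetD T i 0 > d then PySem.List.pySetD T i (PySem.List.pyGetD T i 0 + 1) else T) T1
    (r', T2)) (r, [1])
  st.2.reverse

-- ===== PORT B =====
def permLexUnrank_alt (n : Int) (r : Int) : List Int :=
  let st := (PySem.List.pyRange 2 (n + 1) 1).foldl
      (fun (st : Int × List Int) j =>
        (PySem.Int.floordiv st.1 j, st.2 ++ [PySem.Int.mod st.1 j])) (r, ([] : List Int))
  let avail := PySem.List.pyRange 1 (n + 1) 1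
  let st2 := st.2.reverse.foldl
      (fun (st : List Int × List Int) d =>
        match PySem.List.pop? st.1 d with
        | some p => (p.2, st.2 ++ [p.1])
        | none => (st.1, st.2))    -- pop? = none is Python's IndexError; unreachable under Pre_
      (avail, ([] : List Int))
  match PySem.List.pyGet? st2.1 0 with
  | some v => st2.2 ++ [v]
  | none => st2.2                  -- avail[0] raises IndexError in Python; excluded by Pre_

-- ===== PRECONDITION & SPEC =====
-- Pre_ excludes n ≤ 0 (A then returns [1], the leftover seed of its accumulator T=[1],
-- while the natural B raises IndexError asking for the first of zero remaining values).
def Pre_permLexUnrank (n : Int) (r : Int) : Prop := 1 ≤ n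
instance (n : Int) (r : Int) : Decidable (Pre_permLexUnrank n r) := by unfold Pre_permLexUnrank; infer_instance
def pvWitness_permLexUnrank : Int × Int := (4, 13)
def Spec_permLexUnrank (n : Int) (r : Int) (out : List Int) : Prop := out = permLexUnrank_alt n r
instance (n : Int) (r : Int) (out : List Int) : Decidable (Spec_permLexUnrank n r out) := by unfold Spec_permLexUnrank; infer_instance

-- ===== CLAIM (what is proved, stated in full; the proofs are below) =====
def Claim_equal_permLexUnrank : Prop := ∀ (n : Int) (r : Int), Dom_permLexUnrank n r → Pre_permLexUnrank n r → Spec_permLexUnrank n r (permLexUnrank n r)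

-- ===== LEMMAS AND PROOFS =====

-- k! as an Int
def factI (k : Nat) : Int := (Nat.factorial k : Int)
-- the j-th factorial digit of r (Python floor semantics)
def digit (r : Int) (j : Nat) : Int := PySem.Int.mod (PySem.Int.floordiv r (factI j)) ((j : Int) + 1)
def digitsA (r : Int) (k : Nat) : List Int := (List.range k).map (fun i => digit r (i + 1))
-- A's relabelling step
def bump (d x : Int) : Int := if x > d then x + 1 else x
def stepT (T : List Int) (d : Int) : List Int := T.map (bump d) ++ [d + 1]
def buildT (ds : List Int) : List Int := ds.foldl stepT [1]
-- B's selection, abstractly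
def popOut (avail : List Int) : List Int → List Int
  | [] => []
  | d :: ds => avail.getD d.toNat 0 :: popOut (avail.eraseIdx d.toNat) ds
def availAfter (avail : List Int) : List Int → List Int
  | [] => avail
  | d :: ds => availAfter (avail.eraseIdx d.toNat) ds
def range1 (m : Nat) : List Int := (List.range m).map (fun (i : Nat) => (i : Int) + 1)
-- indices stay in range along the pops
def Valid (ds : List Int) (m : Nat) : Prop := ∀ t (h : t < ds.length), 0 ≤ ds[t] ∧ ds[t].toNat < m - t

theorem factI_pos (k : Nat) : 0 < factI k := by
  unfold factI
  exact_mod_cast Nat.factorial_pos k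

theorem factI_succ (k : Nat) : factI (k + 1) = factI k * ((k : Int) + 1) := by
  unfold factI
  rw [Nat.factorial_succ]
  push_cast
  ring

theorem foldl_range_fact (k : Nat) :
    (List.range k).foldl (fun (a : Int) (i : Nat) => a * ((i : Int) + 1)) 1 = factI k := by
  induction k with
  | zero => simp [factI, Nat.factorial]
  | succ k ih =>
    rw [List.range_succ, List.foldl_append, ih, factI_succ]
    simp

theorem mathFactorial_natCast (k : Nat) : mathFactorial (k : Int) = factI k := by
  unfold mathFactorial
  rw [Int.toNat_natCast]
  exact foldl_range_fact k

theorem fdiv_fdiv (r a b : Int) (ha : 0 < a) (hb : 0 < b) :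
    PySem.Int.floordiv (PySem.Int.floordiv r a) b = PySem.Int.floordiv r (a * b) := by
  rw [PySem.Int.floordiv_eq_ediv_of_pos ha, PySem.Int.floordiv_eq_ediv_of_pos hb,
    PySem.Int.floordiv_eq_ediv_of_pos (by positivity)]
  exact Int.ediv_ediv_of_nonneg ha.le

-- A's inner for-loop over range(0, k) is a map of `bump d` over the first k entries
theorem setfold (d : Int) (W : List Int) (k : Nat) (hk : k ≤ W.length) :
    (PySem.List.pyRange 0 (k : Int) 1).foldl (fun T i =>
        if PySem.List.pyGetD T i 0 > d then PySem.List.pySetD T i (PySem.List.pyGetD T i 0 + 1) else T) W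
      = (W.take k).map (bump d) ++ W.drop k := by
  induction k with
  | zero => simp [PySem.List.pyRange_one_eq_nil]
  | succ k ih =>
    have hk' : k < W.length := by omega
    have hc : ((k + 1 : Nat) : Int) = (k : Int) + 1 := by push_cast; ring
    rw [hc, PySem.List.pyRange_one_succ_right (by positivity), List.foldl_append,
      ih (by omega)]
    simp only [List.foldl_cons, List.foldl_nil]
    have hlen : ((W.take k).map (bump d)).length = k := by simp [List.length_take]; omega
    have hdrop : W.drop k = W[k] :: W.drop (k + 1) := List.drop_eq_getElem_cons hk'
    have hget : PySem.List.pyGetD ((W.take k).map (bump d) ++ W.drop k) (k : Int) 0 = W[k] := by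
      rw [PySem.List.pyGetD_natCast, hdrop]
      rw [List.getD_eq_getElem _ _ (by simp; omega)]
      rw [List.getElem_append_right (by omega)]
      have h1 : min k W.length = k := Nat.min_eq_left hk'.le
      simp [List.length_take, h1]
    have hset : ∀ v, ((W.take k).map (bump d) ++ W.drop k).set k v
        = (W.take k).map (bump d) ++ v :: W.drop (k + 1) := by
      intro v
      rw [List.set_append_right k v hlen.le, hlen, Nat.sub_self, hdrop]
      simp only [List.set_cons_zero]
    have htake : (W.take (k + 1)).map (bump d) = (W.take k).map (bump d) ++ [bump d W[k]] := by
      rw [List.take_add_one, List.getElem?_eq_getElem hk', List.map_append]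
      rfl
    rw [hget]
    by_cases hb : W[k] > d
    · rw [if_pos hb, PySem.List.pySetD_natCast, hset, htake]
      simp [bump, hb]
    · rw [if_neg hb, htake, hdrop]
      simp [bump, hb]

theorem foldl_stepT_length (ds : List Int) : ∀ (T : List Int), (ds.foldl stepT T).length = T.length + ds.length := by
  induction ds with
  | nil => simp
  | cons d ds ih =>
    intro T
    simp only [List.foldl_cons, ih, stepT]
    simp
    omega

theorem length_buildT (ds : List Int) : (buildT ds).length = ds.length + 1 := by
  unfold buildT
  rw [foldl_stepT_length]
  simp [Nat.add_comm]

-- A's outer loop, in closed form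
theorem A_fold (m : Nat) (r : Int) :
    (PySem.List.pyRange 1 (1 + (m : Int)) 1).foldl (fun (st : Int × List Int) j =>
      let md := PySem.Int.mod st.1 (mathFactorial (j + 1))
      let d := PySem.Int.floordiv md (mathFactorial j)
      let r' := st.1 - md
      let T1 := st.2 ++ [d + 1]
      let T2 := (PySem.List.pyRange 0 j 1).foldl (fun T i =>
          if PySem.List.pyGetD T i 0 > d then PySem.List.pySetD T i (PySem.List.pyGetD T i 0 + 1) else T) T1
      (r', T2)) (r, [1])
    = (factI (m + 1) * PySem.Int.floordiv r (factI (m + 1)), buildT (digitsA r m)) := by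
  induction m with
  | zero =>
    rw [PySem.List.pyRange_one_eq_nil (by norm_num)]
    have h1 : factI 1 = 1 := by decide
    rw [List.foldl_nil, h1, PySem.Int.floordiv_eq_ediv_of_pos (by norm_num)]
    simp [digitsA, buildT]
  | succ m ih =>
    have hc1 : (1 : Int) + ((m + 1 : Nat) : Int) = (1 + (m : Int)) + 1 := by push_cast; ring
    rw [hc1, PySem.List.pyRange_one_succ_right (by omega), List.foldl_append, ih]
    simp only [List.foldl_cons, List.foldl_nil]
    have h2 : (1 : Int) + (m : Int) + 1 = ((m + 2 : Nat) : Int) := by push_cast; ring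
    have h3 : (1 : Int) + (m : Int) = ((m + 1 : Nat) : Int) := by push_cast; ring
    have hfa : mathFactorial (1 + (m : Int) + 1) = factI (m + 2) := by
      rw [h2, mathFactorial_natCast]
    have hfb : mathFactorial (1 + (m : Int)) = factI (m + 1) := by
      rw [h3, mathFactorial_natCast]
    rw [hfa, hfb]
    have hfs : factI (m + 2) = factI (m + 1) * ((m : Int) + 2) := by
      rw [factI_succ (m + 1)]; push_cast; ring
    have hmd : PySem.Int.mod (factI (m + 1) * PySem.Int.floordiv r (factI (m + 1))) (factI (m + 2))
        = factI (m + 1) * PySem.Int.mod (PySem.Int.floordiv r (factI (m + 1))) ((m : Int) + 2) := by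
      rw [hfs, PySem.Int.mod_eq_emod_of_pos (mul_pos (factI_pos (m + 1)) (by positivity)),
        PySem.Int.mod_eq_emod_of_pos (show (0:Int) < (m : Int) + 2 by positivity)]
      exact Int.mul_emod_mul_of_pos _ _ (factI_pos (m + 1))
    rw [hmd]
    have hd : PySem.Int.floordiv
        (factI (m + 1) * PySem.Int.mod (PySem.Int.floordiv r (factI (m + 1))) ((m : Int) + 2))
        (factI (m + 1)) = digit r (m + 1) := by
      rw [PySem.Int.floordiv_eq_ediv_of_pos (factI_pos (m + 1)),
        Int.mul_ediv_cancel_left _ (ne_of_gt (factI_pos (m + 1)))]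
      unfold digit
      have hcc : ((m + 1 : Nat) : Int) + 1 = (m : Int) + 2 := by push_cast; ring
      rw [hcc]
    rw [hd]
    rw [Prod.mk.injEq]
    refine ⟨?_, ?_⟩
    · have hfs' : factI (m + 1 + 1) = factI (m + 1) * ((m : Int) + 2) := hfs
      rw [hfs', ← fdiv_fdiv r (factI (m + 1)) ((m : Int) + 2) (factI_pos (m + 1)) (by omega)]
      rw [PySem.Int.mod_eq_emod_of_pos (show (0:Int) < (m:Int) + 2 by omega)]
      simp only [PySem.Int.floordiv_eq_ediv_of_pos (factI_pos (m + 1)),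
        PySem.Int.floordiv_eq_ediv_of_pos (show (0:Int) < (m:Int) + 2 by omega), Int.emod_def]
      ring
    · have hlenT : (buildT (digitsA r m)).length = m + 1 := by
        rw [length_buildT]; simp [digitsA]
      rw [h3, setfold (digit r (m + 1)) _ (m + 1) (by simp [hlenT])]
      rw [List.take_left' hlenT, List.drop_left' hlenT]
      have hdsucc : digitsA r (m + 1) = digitsA r m ++ [digit r (m + 1)] := by
        simp [digitsA, List.range_succ]
      rw [hdsucc]
      unfold buildT
      rw [List.foldl_append]
      simp [stepT]

-- B's digit loop, in closed form
theorem B_fold (m : Nat) (r : Int) :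
    (PySem.List.pyRange 2 (2 + (m : Int)) 1).foldl
      (fun (st : Int × List Int) j =>
        (PySem.Int.floordiv st.1 j, st.2 ++ [PySem.Int.mod st.1 j])) (r, ([] : List Int))
    = (PySem.Int.floordiv r (factI (m + 1)), digitsA r m) := by
  induction m with
  | zero =>
    rw [PySem.List.pyRange_one_eq_nil (by norm_num)]
    have h1 : factI 1 = 1 := by decide
    rw [List.foldl_nil, h1, PySem.Int.floordiv_eq_ediv_of_pos (by norm_num)]
    simp [digitsA]
  | succ m ih =>
    have hc1 : (2 : Int) + ((m + 1 : Nat) : Int) = (2 + (m : Int)) + 1 := by push_cast; ring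
    rw [hc1, PySem.List.pyRange_one_succ_right (by omega), List.foldl_append, ih]
    simp only [List.foldl_cons, List.foldl_nil]
    rw [Prod.mk.injEq]
    refine ⟨?_, ?_⟩
    · rw [fdiv_fdiv r (factI (m + 1)) (2 + (m : Int)) (factI_pos (m + 1)) (by omega)]
      congr 1
      rw [factI_succ (m + 1)]
      push_cast
      ring
    · have hdsucc : digitsA r (m + 1) = digitsA r m ++ [digit r (m + 1)] := by
        simp [digitsA, List.range_succ]
      rw [hdsucc]
      congr 1
      unfold digit
      congr 1
      push_cast
      ring

theorem valid_cons {d : Int} {ds : List Int} {m : Nat} (h : Valid (d :: ds) m) :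
    0 ≤ d ∧ d.toNat < m ∧ Valid ds (m - 1) := by
  refine ⟨(h 0 (by simp)).1, ?_, ?_⟩
  · have := (h 0 (by simp)).2
    simpa using this
  · intro t ht
    have := h (t + 1) (by simp; omega)
    simp at this
    exact ⟨this.1, by omega⟩

-- B's pop loop equals popOut/availAfter when every index is in range
theorem pops (ds : List Int) : ∀ (avail out : List Int), Valid ds avail.length →
    ds.foldl (fun (st : List Int × List Int) d =>
        match PySem.List.pop? st.1 d with
        | some p => (p.2, st.2 ++ [p.1])
        | none => (st.1, st.2)) (avail, out)
    = (availAfter avail ds, out ++ popOut avail ds) := by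
  induction ds with
  | nil => intro avail out _; simp [availAfter, popOut]
  | cons d ds ih =>
    intro avail out h
    obtain ⟨h0, hlt, hv⟩ := valid_cons h
    have hpop : PySem.List.pop? avail d = some (avail[d.toNat], avail.eraseIdx d.toNat) := by
      conv_lhs => rw [← Int.toNat_of_nonneg h0]
      exact PySem.List.pop?_natCast avail d.toNat hlt
    have htail : Valid ds (avail.eraseIdx d.toNat).length := by
      rwa [List.length_eraseIdx_of_lt hlt]
    rw [List.foldl_cons, hpop]
    simp only []
    rw [ih _ _ htail]
    simp only [availAfter, popOut]
    rw [List.getD_eq_getElem _ _ hlt]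
    simp

theorem popOut_map (g : Int → Int) (ds : List Int) : ∀ (avail : List Int), Valid ds avail.length →
    popOut (avail.map g) ds = (popOut avail ds).map g := by
  induction ds with
  | nil => intro avail _; simp [popOut]
  | cons d ds ih =>
    intro avail h
    obtain ⟨h0, hlt, hv⟩ := valid_cons h
    have htail' : Valid ds (avail.eraseIdx d.toNat).length := by
      rwa [List.length_eraseIdx_of_lt hlt]
    simp only [popOut]
    rw [List.getD_eq_getElem _ _ (by simpa using hlt), List.getD_eq_getElem _ _ hlt,
      List.getElem_map, List.eraseIdx_map, ih _ htail']
    simp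

theorem popOut_append (xs ys : List Int) : ∀ (avail : List Int),
    popOut avail (xs ++ ys) = popOut avail xs ++ popOut (availAfter avail xs) ys := by
  induction xs with
  | nil => intro avail; simp [popOut, availAfter]
  | cons d xs ih => intro avail; simp [popOut, availAfter, ih]

theorem length_availAfter (ds : List Int) : ∀ (avail : List Int), Valid ds avail.length →
    (availAfter avail ds).length = avail.length - ds.length := by
  induction ds with
  | nil => intro avail _; simp [availAfter]
  | cons d ds ih =>
    intro avail h
    obtain ⟨h0, hlt, hv⟩ := valid_cons h
    have htail : Valid ds (avail.eraseIdx d.toNat).length := by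
      rwa [List.length_eraseIdx_of_lt hlt]
    simp only [availAfter]
    rw [ih _ htail, List.length_eraseIdx_of_lt hlt]
    simp
    omega

theorem length_range1 (M : Nat) : (range1 M).length = M := by simp [range1]
theorem getElem_range1 (M j : Nat) (h : j < (range1 M).length) : (range1 M)[j] = (j : Int) + 1 := by
  unfold range1 at *
  rw [List.getElem_map]
  congr 1
  rw [List.getElem_range]
theorem erase_range1 (k : Nat) (d : Int) (h0 : 0 ≤ d) (hd : d.toNat ≤ k) :
    (range1 (k + 1)).eraseIdx d.toNat = (range1 k).map (bump d) := by
  apply List.ext_getElem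
  · rw [List.length_eraseIdx_of_lt (by simp [length_range1]; omega)]
    simp [length_range1]
  · intro j h1 h2
    have hj : j < k := by
      have := h2; rwa [List.length_map, length_range1] at this
    rw [List.getElem_eraseIdx, List.getElem_map, getElem_range1]
    by_cases hc : j < d.toNat
    · rw [dif_pos hc, getElem_range1]
      simp only [bump]
      rw [if_neg (by omega)]
    · rw [dif_neg hc, getElem_range1, getElem_range1]
      simp only [bump]
      rw [if_pos (by omega)]
      push_cast; ring

def ValidDigits (ds : List Int) : Prop := ∀ i (h : i < ds.length), 0 ≤ ds[i] ∧ ds[i] ≤ (i : Int) + 1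

theorem valid_rev (ds : List Int) (h : ValidDigits ds) : Valid (ds.reverse ++ [0]) (ds.length + 1) := by
  intro t ht
  have hlen : (ds.reverse ++ [0]).length = ds.length + 1 := by simp
  by_cases hc : t < ds.length
  · rw [List.getElem_append_left (by simpa using hc)]
    rw [List.getElem_reverse]
    have := h (ds.length - 1 - t) (by omega)
    obtain ⟨ha, hb⟩ := this
    refine ⟨ha, ?_⟩
    omega
  · have ht' : t = ds.length := by
      simp at ht
      omega
    subst ht'
    rw [List.getElem_append_right (by simp)]
    simp

theorem build_pop (ds : List Int) (h : ValidDigits ds) :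
    (buildT ds).reverse = popOut (range1 (ds.length + 1)) (ds.reverse ++ [0]) := by
  induction ds using List.reverseRecOn with
  | nil => simp [buildT, popOut, range1, List.range_succ]
  | append_singleton ds d ih =>
    have hpre : ValidDigits ds := by
      intro i hi
      have := h i (by simp; omega)
      rwa [List.getElem_append_left hi] at this
    have hd0 : 0 ≤ d := by
      have := (h ds.length (by simp)).1
      simpa using this
    have hdk : d ≤ (ds.length : Int) + 1 := by
      have := (h ds.length (by simp)).2
      simpa using this
    have hstep : buildT (ds ++ [d]) = (buildT ds).map (bump d) ++ [d + 1] := by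
      unfold buildT
      rw [List.foldl_append]
      simp [stepT]
    rw [hstep, List.reverse_append, ← List.map_reverse]
    have hrev : (ds ++ [d]).reverse ++ [0] = d :: (ds.reverse ++ [0]) := by simp
    rw [hrev]
    have hvalid : Valid (ds.reverse ++ [0]) (range1 (ds.length + 1)).length := by
      rw [length_range1]; exact valid_rev ds hpre
    simp only [popOut, List.length_append, List.length_cons, List.length_nil]
    rw [List.getD_eq_getElem _ _ (by simp [length_range1]; omega)]
    rw [getElem_range1 _ _ (by simp [length_range1]; omega)]
    rw [Int.toNat_of_nonneg hd0]
    rw [erase_range1 (ds.length + 1) d hd0 (by omega)]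
    rw [popOut_map (bump d) _ _ hvalid, ← ih hpre]
    simp

theorem digitsA_valid (r : Int) (k : Nat) : ValidDigits (digitsA r k) := by
  intro i hi
  have hi' : i < k := by simpa [digitsA] using hi
  have hg : (digitsA r k)[i] = digit r (i + 1) := by
    simp [digitsA]
  rw [hg]
  have hpos : (0 : Int) < ((i + 1 : Nat) : Int) + 1 := by push_cast; omega
  constructor
  · exact PySem.Int.mod_nonneg _ hpos
  · have := PySem.Int.mod_lt (PySem.Int.floordiv r (factI (i + 1))) hpos
    unfold digit
    push_cast at this ⊢
    omega

-- ===== VERDICT (by name: the statement is the Claim_ definition above) =====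
theorem pyRange_eq_range1 (M : Nat) : PySem.List.pyRange 1 (1 + (M : Int)) 1 = range1 M := by
  rw [PySem.List.pyRange_one]
  have h1 : ((1 : Int) + M - 1).toNat = M := by omega
  rw [h1]
  exact List.map_congr_left (fun x _ => by ring)

theorem valid_prefix (xs ys : List Int) (m : Nat) (h : Valid (xs ++ ys) m) : Valid xs m := by
  intro t ht
  have := h t (by simp; omega)
  rwa [List.getElem_append_left ht] at this

theorem permLexUnrank_spec : Claim_equal_permLexUnrank := by
  intro n r _ hpre
  unfold Spec_permLexUnrank
  have hpre' : 1 ≤ n := hpre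
  have hn : n = 1 + ((n - 1).toNat : Int) := by omega
  set M := (n - 1).toNat with hM
  have hA : permLexUnrank n r = (buildT (digitsA r M)).reverse := by
    unfold permLexUnrank
    rw [hn, A_fold M r]
  have h2 : n + 1 = 2 + (M : Int) := by omega
  have hDs := digitsA_valid r M
  have hlen : (digitsA r M).length = M := by simp [digitsA]
  have hv0 : Valid ((digitsA r M).reverse ++ [0]) (M + 1) := by
    have := valid_rev (digitsA r M) hDs
    rwa [hlen] at this
  have hv : Valid (digitsA r M).reverse (M + 1) := valid_prefix _ _ _ hv0
  have havail : (2 : Int) + (M : Int) = 1 + ((M + 1 : Nat) : Int) := by push_cast; ring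
  have hAA : (availAfter (range1 (M + 1)) (digitsA r M).reverse).length = 1 := by
    rw [length_availAfter _ _ (by rw [length_range1]; exact hv), length_range1]
    simp [hlen]
  obtain ⟨x, hx⟩ := List.length_eq_one_iff.mp hAA
  have hB : permLexUnrank_alt n r = popOut (range1 (M + 1)) (digitsA r M).reverse ++ [x] := by
    unfold permLexUnrank_alt
    rw [h2, B_fold M r, havail, pyRange_eq_range1 (M + 1)]
    dsimp only
    rw [pops _ _ _ (by rw [length_range1]; exact hv)]
    rw [hx, PySem.List.pyGet?_zero_cons]
    simp
  rw [hA, hB, build_pop _ hDs, hlen, popOut_append, hx]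
  simp [popOut]
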